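-- pv_equiv track=rewrite | github.com/programmers-algorithm-study-team5/code-review | 황다경/2주차/2주차_기능개발.py | solution
-- ===== SOURCE A (Python) =====
-- from collections import deque
--
-- def solution(progresses, speeds):
--     days = [-((p-100) // s) for p, s in zip(progresses, speeds)]
--     queue = deque(days)
--     result = []
--
--     while queue:
--         current_day = queue.popleft()
--         count = 1
--
--         while queue and queue[0] <= current_day:
--             queue.popleft()
--             count += 1
--
--         result.append(count)
--
--     return result
-- ===== SOURCE B (Python) =====
-- def solution(progresses, speeds):
--     days = [-((p - 100) // s) for p, s in zip(progresses, speeds)]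
--     if not days:
--         return []
--     result = []
--     current, count = days[0], 1
--     for d in days[1:]:
--         if d <= current:
--             count += 1
--         else:
--             result.append(count)
--             current, count = d, 1
--     result.append(count)
--     return result
-- ===== Notes on version B (the rewrite author's own statement) =====
-- stated objective: simpler
-- what changed: Replaces the deque with nested popleft loops by one forward pass over the days list keeping the current batch leader and a counter.
import Mathlib
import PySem

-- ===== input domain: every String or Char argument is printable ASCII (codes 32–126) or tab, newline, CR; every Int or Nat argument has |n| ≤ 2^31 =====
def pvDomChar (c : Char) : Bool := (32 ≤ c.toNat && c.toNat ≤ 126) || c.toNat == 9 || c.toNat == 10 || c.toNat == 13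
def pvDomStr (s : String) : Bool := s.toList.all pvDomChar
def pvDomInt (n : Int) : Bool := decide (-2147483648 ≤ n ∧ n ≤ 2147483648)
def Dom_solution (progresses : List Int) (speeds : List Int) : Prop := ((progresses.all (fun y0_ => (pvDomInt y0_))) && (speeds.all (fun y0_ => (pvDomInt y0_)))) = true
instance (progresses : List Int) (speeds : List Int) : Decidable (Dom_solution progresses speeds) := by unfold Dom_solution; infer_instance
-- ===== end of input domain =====

-- B replaces A's deque with nested popleft loops by a single forward pass over
-- the days list maintaining the current batch leader and a counter (simpler).

-- ===== PORT A =====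
-- inner 'while queue and queue[0] <= current_day' loop: pops leading elements ≤ d, counting
def popLe (d : Int) : List Int → Int → Int × List Int
  | [], c => (c, [])
  | x :: xs, c => if x ≤ d then popLe d xs (c + 1) else (c, x :: xs)

theorem popLe_len (d : Int) : ∀ (l : List Int) (c : Int), (popLe d l c).2.length ≤ l.length := by
  intro l
  induction l with
  | nil => intro c; simp [popLe]
  | cons x xs ih =>
      intro c
      simp only [popLe]
      split
      · exact Nat.le_trans (ih (c + 1)) (Nat.le_succ _)
      · simp

-- outer 'while queue' loop
def aloop : List Int → List Int
  | [] => []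
  | d :: rest =>
      let r := popLe d rest 1
      r.1 :: aloop r.2
termination_by l => l.length
decreasing_by
  exact Nat.lt_succ_of_le (popLe_len d rest 1)

def solution (progresses : List Int) (speeds : List Int) : List Int :=
  aloop ((progresses.zip speeds).map (fun ps => -(PySem.Int.floordiv (ps.1 - 100) ps.2)))

-- ===== PORT B =====
-- forward pass: current batch leader 'cur', counter 'cnt'
def bloop (cur cnt : Int) : List Int → List Int
  | [] => [cnt]
  | d :: rest => if d ≤ cur then bloop cur (cnt + 1) rest else cnt :: bloop d 1 rest

def solution_alt (progresses : List Int) (speeds : List Int) : List Int :=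
  match (progresses.zip speeds).map (fun ps => -(PySem.Int.floordiv (ps.1 - 100) ps.2)) with
  | [] => []
  | d :: rest => bloop d 1 rest

-- ===== PRECONDITION & SPEC =====
-- Pre_ excludes exactly the inputs where Python A raises ZeroDivisionError: a zero speed paired with a progress
def Pre_solution (progresses : List Int) (speeds : List Int) : Prop :=
  ∀ ps ∈ progresses.zip speeds, ps.2 ≠ 0
instance (progresses : List Int) (speeds : List Int) : Decidable (Pre_solution progresses speeds) := by unfold Pre_solution; infer_instance
def pvWitness_solution : List Int × List Int := ([93, 30, 55], [1, 30, 5])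

def Spec_solution (progresses : List Int) (speeds : List Int) (out : List Int) : Prop := out = solution_alt progresses speeds
instance (progresses : List Int) (speeds : List Int) (out : List Int) : Decidable (Spec_solution progresses speeds out) := by unfold Spec_solution; infer_instance

-- ===== CLAIM (what is proved, stated in full; the proofs are below) =====
def Claim_equal_solution : Prop := ∀ (progresses : List Int) (speeds : List Int), Dom_solution progresses speeds → Pre_solution progresses speeds → Spec_solution progresses speeds (solution progresses speeds)

-- ===== LEMMAS AND PROOFS =====

theorem aloop_nil : aloop [] = [] := by rw [aloop]

theorem aloop_cons (d : Int) (rest : List Int) :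
    aloop (d :: rest) = (popLe d rest 1).1 :: aloop (popLe d rest 1).2 := by rw [aloop]

theorem bloop_eq_popLe : ∀ (l : List Int) (d c : Int),
    bloop d c l = (popLe d l c).1 :: aloop (popLe d l c).2 := by
  intro l
  induction l with
  | nil => intro d c; simp [bloop, popLe, aloop_nil]
  | cons x xs ih =>
      intro d c
      by_cases h : x ≤ d
      · simp [bloop, popLe, h, ih]
      · simp [bloop, popLe, h, aloop_cons, ih]

theorem aloop_eq_b : ∀ (l : List Int),
    aloop l = (match l with | [] => [] | d :: rest => bloop d 1 rest) := by
  intro l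
  cases l with
  | nil => exact aloop_nil
  | cons d rest => simp only []; rw [bloop_eq_popLe, aloop_cons]

-- ===== VERDICT (by name: the statement is the Claim_ definition above) =====
theorem solution_spec : Claim_equal_solution := by
  intro p s _ _
  unfold Spec_solution solution solution_alt
  rw [aloop_eq_b]
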